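-- pv_equiv track=rewrite | github.com/emielver/project-euler-hacking | problem55.py | mainThing
-- ===== SOURCE A (Python) =====
-- def isPalindrome(potential):
--     return str(potential) == str(potential)[::-1]
--
-- def getReverse(n):
--     s = str(n)
--     return int(s[::-1])
--
-- def mainThing(n, count):
--     if count > 50:
--         return count
--     rev = getReverse(n)
--     total = rev + n
--     if isPalindrome(total):
--         return count
--     else:
--         count += 1
--         return mainThing(total, count)
-- ===== SOURCE B (Python) =====
-- def mainThing(n, count):
--     while count <= 50:
--         total = int(str(n)[::-1]) + n
--         s = str(total)
--         if s == s[::-1]: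
--             return count
--         count += 1
--         n = total
--     return count
-- ===== Notes on version B (the rewrite author's own statement) =====
-- stated objective: simpler
-- what changed: Replaces the recursion over the step counter (with separate isPalindrome/getReverse helpers) by a single explicit while-loop that threads n and count, with the helpers inlined.
import Mathlib
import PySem

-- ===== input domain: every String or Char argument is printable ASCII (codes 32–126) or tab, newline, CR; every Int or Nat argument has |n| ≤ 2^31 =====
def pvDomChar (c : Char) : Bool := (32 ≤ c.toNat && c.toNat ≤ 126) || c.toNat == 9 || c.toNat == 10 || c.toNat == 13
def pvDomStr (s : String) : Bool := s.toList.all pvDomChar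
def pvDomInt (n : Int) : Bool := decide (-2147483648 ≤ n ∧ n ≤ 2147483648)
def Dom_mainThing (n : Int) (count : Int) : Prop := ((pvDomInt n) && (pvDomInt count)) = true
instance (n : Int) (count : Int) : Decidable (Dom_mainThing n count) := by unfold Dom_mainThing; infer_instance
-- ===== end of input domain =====

-- B rewrites the recursion over the step counter as one explicit while-loop with the helpers inlined (objective: simpler).

-- ===== PORT A =====
def isPalindrome (potential : Int) : Bool :=
  PySem.Int.toStr potential ==
    ((PySem.Str.slice? (PySem.Int.toStr potential) none none (-1)).getD "")

-- int(s[::-1]); the .getD 0 is reached only when int() would raise ValueError (excluded by Pre_)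
def getReverse (n : Int) : Int :=
  let s := PySem.Int.toStr n
  (PySem.Int.ofStr? ((PySem.Str.slice? s none none (-1)).getD "")).getD 0

def mainThing (n : Int) (count : Int) : Int :=
  if count > 50 then count
  else
    let rev := getReverse n
    let total := rev + n
    if isPalindrome total then count
    else mainThing total (count + 1)
termination_by (51 - count).toNat
decreasing_by omega

-- ===== PORT B =====
-- the while-loop of Source B: runs while count ≤ 50, i.e. for at most (51 - count) iterations
def altLoop (fuel : Nat) (n : Int) (count : Int) : Int :=
  match fuel with
  | 0 => count
  | f + 1 =>
    let total :=
      (PySem.Int.ofStr?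
        ((PySem.Str.slice? (PySem.Int.toStr n) none none (-1)).getD "")).getD 0 + n
    let s := PySem.Int.toStr total
    if s == ((PySem.Str.slice? s none none (-1)).getD "") then count
    else altLoop f total (count + 1)

def mainThing_alt (n : Int) (count : Int) : Int :=
  altLoop (51 - count).toNat n count

-- ===== PRECONDITION & SPEC =====
-- Pre_ excludes exactly the inputs on which A raises ValueError: negative n with count ≤ 50
-- (str(n)[::-1] ends in '-', so int() fails).
def Pre_mainThing (n : Int) (count : Int) : Prop := 0 ≤ n ∨ 50 < count
instance (n : Int) (count : Int) : Decidable (Pre_mainThing n count) := by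
  unfold Pre_mainThing; infer_instance
def pvWitness_mainThing : Int × Int := (196, 1)

def Spec_mainThing (n : Int) (count : Int) (out : Int) : Prop := out = mainThing_alt n count
instance (n : Int) (count : Int) (out : Int) : Decidable (Spec_mainThing n count out) := by
  unfold Spec_mainThing; infer_instance

-- ===== CLAIM (what is proved, stated in full; the proofs are below) =====
def Claim_equal_mainThing : Prop := ∀ (n : Int) (count : Int), Dom_mainThing n count → Pre_mainThing n count → Spec_mainThing n count (mainThing n count)

-- ===== LEMMAS AND PROOFS =====

theorem mainThing_eq_altLoop (f : Nat) (n count : Int)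
    (hf : f = (51 - count).toNat) : mainThing n count = altLoop f n count := by
  induction f generalizing n count with
  | zero =>
    have h : count > 50 := by omega
    rw [mainThing, if_pos h]
    rfl
  | succ f ih =>
    have h : ¬ count > 50 := by omega
    rw [mainThing, if_neg h]
    show (if isPalindrome (getReverse n + n) then count
          else mainThing (getReverse n + n) (count + 1)) = _
    have hrev : getReverse n =
        (PySem.Int.ofStr?
          ((PySem.Str.slice? (PySem.Int.toStr n) none none (-1)).getD "")).getD 0 := rfl
    have hpal : ∀ t : Int, isPalindrome t =
        (PySem.Int.toStr t ==
          ((PySem.Str.slice? (PySem.Int.toStr t) none none (-1)).getD "")) := fun _ => rfl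
    simp only [altLoop, ← hrev, ← hpal]
    split
    · rfl
    · exact ih _ _ (by omega)

-- ===== VERDICT (by name: the statement is the Claim_ definition above) =====
theorem mainThing_spec : Claim_equal_mainThing := by
  intro n count _ _
  exact mainThing_eq_altLoop _ n count rfl
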